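-- pv_equiv track=rewrite | github.com/fury93/leetcode_python3_solutions | 2503-longest-subarray-with-maximum-bitwise-and/longest-subarray-with-maximum-bitwise-and.py | longestSubarray2
-- ===== SOURCE A (Python) =====
-- from typing import List
--
-- def longestSubarray2(nums: List[int]) -> int:
--     maxSubarrayLen, subarrayLen, mx, = 0, 0, max(nums)
--     for n in nums:
--         if n == mx:
--             subarrayLen += 1
--             maxSubarrayLen = max(maxSubarrayLen, subarrayLen)
--         else:
--             subarrayLen = 0
--
--     return maxSubarrayLen
-- ===== SOURCE B (Python) =====
-- def longestSubarray2(nums):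
--     mx = max(nums)
--     barriers = [-1] + [i for i, n in enumerate(nums) if n != mx] + [len(nums)]
--     return max(b - a - 1 for a, b in zip(barriers, barriers[1:]))
-- ===== Notes on version B (the rewrite author's own statement) =====
-- stated objective: alternative
-- what changed: B computes the positions of all non-maximum elements, pads them with -1 and len(nums), and returns the largest gap between consecutive such barrier positions minus one, instead of A's single-pass running counter with a reset branch.
import Mathlib
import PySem

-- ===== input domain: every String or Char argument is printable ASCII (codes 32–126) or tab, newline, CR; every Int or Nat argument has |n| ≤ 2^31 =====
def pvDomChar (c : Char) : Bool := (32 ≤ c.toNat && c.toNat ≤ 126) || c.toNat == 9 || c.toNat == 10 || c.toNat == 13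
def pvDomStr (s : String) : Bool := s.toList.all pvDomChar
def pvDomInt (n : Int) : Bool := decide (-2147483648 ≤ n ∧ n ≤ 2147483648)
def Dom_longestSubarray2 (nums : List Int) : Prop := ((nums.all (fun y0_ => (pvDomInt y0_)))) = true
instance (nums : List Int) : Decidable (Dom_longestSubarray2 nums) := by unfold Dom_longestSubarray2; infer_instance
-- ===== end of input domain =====

-- B uses a different algorithm: positions of non-max elements padded with -1 and len(nums),
-- answer = max gap between consecutive positions minus 1; return values proved equal on nonempty lists.

-- ===== PORT A =====
-- the for-loop: state (maxSubarrayLen, subarrayLen)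
def longestSubarray2Step (mx : Int) (st : Int × Int) (n : Int) : Int × Int :=
  if n = mx then (max st.1 (st.2 + 1), st.2 + 1) else (st.1, 0)

def longestSubarray2 (nums : List Int) : Int :=
  match PySem.List.max? nums (fun y => y) with
  | none => 0  -- unreachable under Pre_: max([]) raises ValueError
  | some mx => (nums.foldl (longestSubarray2Step mx) (0, 0)).1

-- ===== PORT B =====
-- [i for i, n in enumerate(nums) if n != mx]: index counter carried through the list
def pyBarrIdx (mx : Int) : Nat → List Int → List Int
  | _, [] => []
  | i, n :: ns => if n ≠ mx then (i : Int) :: pyBarrIdx mx (i + 1) ns else pyBarrIdx mx (i + 1) ns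

def longestSubarray2_alt (nums : List Int) : Int :=
  match PySem.List.max? nums (fun y => y) with
  | none => 0  -- unreachable under Pre_: max([]) raises ValueError
  | some mx =>
    let barriers : List Int := -1 :: (pyBarrIdx mx 0 nums ++ [(nums.length : Int)])
    let gaps : List Int := (barriers.zip (barriers.drop 1)).map (fun ab => ab.2 - ab.1 - 1)
    match PySem.List.max? gaps (fun y => y) with
    | none => 0  -- unreachable: barriers always has ≥ 2 elements
    | some g => g

-- ===== PRECONDITION & SPEC =====
-- Pre_ excludes only the empty list, on which A (and B) raise ValueError from max(nums).
def Pre_longestSubarray2 (nums : List Int) : Prop := nums ≠ []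
instance (nums : List Int) : Decidable (Pre_longestSubarray2 nums) := by unfold Pre_longestSubarray2; infer_instance
def pvWitness_longestSubarray2 : List Int := [1, 3, 3, 2]

def Spec_longestSubarray2 (nums : List Int) (out : Int) : Prop := out = longestSubarray2_alt nums
instance (nums : List Int) (out : Int) : Decidable (Spec_longestSubarray2 nums out) := by unfold Spec_longestSubarray2; infer_instance

-- ===== CLAIM (what is proved, stated in full; the proofs are below) =====
def Claim_equal_longestSubarray2 : Prop := ∀ (nums : List Int), Dom_longestSubarray2 nums → Pre_longestSubarray2 nums → Spec_longestSubarray2 nums (longestSubarray2 nums)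

-- ===== LEMMAS AND PROOFS =====

-- reference function: longest mx-run length reachable from a carried current-run length s
def gRun (mx : Int) (s : Int) : List Int → Int
  | [] => s
  | x :: xs => if x = mx then gRun mx (s + 1) xs else max s (gRun mx 0 xs)

theorem gRun_ge (mx s : Int) (l : List Int) : s ≤ gRun mx s l := by
  induction l generalizing s with
  | nil => simp [gRun]
  | cons x xs ih =>
    simp only [gRun]
    split
    · exact le_trans (by omega) (ih (s + 1))
    · exact le_max_left _ _

theorem foldlA_eq_gRun (mx : Int) (l : List Int) (m s : Int) (h0 : 0 ≤ s) (h : s ≤ m) :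
    (l.foldl (longestSubarray2Step mx) (m, s)).1 = max m (gRun mx s l) := by
  induction l generalizing m s with
  | nil => simp [gRun]; omega
  | cons x xs ih =>
    simp only [List.foldl_cons, longestSubarray2Step, gRun]
    by_cases hx : x = mx
    · simp only [if_pos hx]
      rw [ih (max m (s + 1)) (s + 1) (by omega) (le_max_right _ _)]
      have := gRun_ge mx (s + 1) xs
      omega
    · simp only [if_neg hx]
      rw [ih m 0 le_rfl (by omega)]
      have := gRun_ge mx (0 : Int) xs
      omega

-- the list of gaps of p :: bs ++ [last]
def gapsList (p : Int) : List Int → Int → List Int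
  | [], last => [last - p - 1]
  | b :: bs, last => (b - p - 1) :: gapsList b bs last

theorem zip_gaps (bs : List Int) (p last : Int) :
    (((p :: (bs ++ [last])).zip (bs ++ [last])).map (fun ab => ab.2 - ab.1 - 1))
      = gapsList p bs last := by
  induction bs generalizing p with
  | nil => simp [gapsList]
  | cons b bs ih => simp [gapsList, ih b]

-- running max over the gaps, consuming the barrier list
def gapFold (acc p : Int) : List Int → Int → Int
  | [], last => max acc (last - p - 1)
  | b :: bs, last => gapFold (max acc (b - p - 1)) b bs last

theorem gapsList_foldl (bs : List Int) (p last acc : Int) :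
    (gapsList p bs last).foldl max acc = gapFold acc p bs last := by
  induction bs generalizing p acc with
  | nil => simp [gapsList, gapFold]
  | cons b bs ih => simp [gapsList, gapFold, ih]

theorem gapFold_barr (mx : Int) (l : List Int) (i : Nat) (p acc : Int) :
    gapFold acc p (pyBarrIdx mx i l) ((i : Int) + l.length) = max acc (gRun mx ((i : Int) - p - 1) l) := by
  induction l generalizing i p acc with
  | nil => simp [pyBarrIdx, gapFold, gRun]
  | cons x xs ih =>
    by_cases hx : x = mx
    · subst hx
      rw [show pyBarrIdx x i (x :: xs) = pyBarrIdx x (i + 1) xs from by simp [pyBarrIdx]]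
      rw [show gRun x ((i : Int) - p - 1) (x :: xs) = gRun x (((i : Int) - p - 1) + 1) xs from by
        simp [gRun]]
      have h1 : (i : Int) + ((x :: xs).length : Int) = ((i + 1 : Nat) : Int) + xs.length := by
        simp only [List.length_cons]; push_cast; ring
      have h2 : ((i + 1 : Nat) : Int) - p - 1 = ((i : Int) - p - 1) + 1 := by push_cast; ring
      rw [h1, ih (i + 1) p acc, h2]
    · rw [show pyBarrIdx mx i (x :: xs) = (i : Int) :: pyBarrIdx mx (i + 1) xs from by
        simp [pyBarrIdx, hx]]
      rw [show gRun mx ((i : Int) - p - 1) (x :: xs) = max ((i : Int) - p - 1) (gRun mx 0 xs) from by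
        simp [gRun, hx]]
      simp only [gapFold]
      have h1 : (i : Int) + ((x :: xs).length : Int) = ((i + 1 : Nat) : Int) + xs.length := by
        simp only [List.length_cons]; push_cast; ring
      have h2 : ((i + 1 : Nat) : Int) - (i : Int) - 1 = 0 := by push_cast; ring
      rw [h1, ih (i + 1) (i : Int) (max acc ((i : Int) - p - 1)), h2, max_assoc]

theorem mem_pyBarrIdx_le (mx : Int) (l : List Int) (i : Nat) (x : Int)
    (hx : x ∈ pyBarrIdx mx i l) : (i : Int) ≤ x := by
  induction l generalizing i with
  | nil => simp [pyBarrIdx] at hx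
  | cons y ys ih =>
    simp only [pyBarrIdx] at hx
    by_cases hy : y = mx
    · simp only [hy, ne_eq, not_true_eq_false, if_false] at hx
      have := ih (i + 1) hx
      push_cast at this ⊢; omega
    · rw [if_pos hy] at hx
      rcases List.mem_cons.mp hx with h | h
      · omega
      · have := ih (i + 1) h
        push_cast at this ⊢; omega

-- ===== VERDICT (by name: the statement is the Claim_ definition above) =====
theorem longestSubarray2_spec : Claim_equal_longestSubarray2 := by
  intro nums _ hpre
  unfold Spec_longestSubarray2 longestSubarray2 longestSubarray2_alt
  cases hm : PySem.List.max? nums (fun y => y) with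
  | none => rfl
  | some mx =>
    simp only [List.drop_succ_cons, List.drop_zero]
    rw [zip_gaps (pyBarrIdx mx 0 nums) (-1) (nums.length : Int)]
    -- the gap list is a nonempty cons in both shapes of pyBarrIdx, with nonnegative head
    obtain ⟨g0, rest, hsh, hg0⟩ :
        ∃ g0 rest, gapsList (-1) (pyBarrIdx mx 0 nums) (nums.length : Int) = g0 :: rest ∧ 0 ≤ g0 := by
      cases hb : pyBarrIdx mx 0 nums with
      | nil => exact ⟨_, _, rfl, by omega⟩
      | cons b bs =>
        refine ⟨b - (-1) - 1, gapsList b bs (nums.length : Int), rfl, ?_⟩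
        have := mem_pyBarrIdx_le mx nums 0 b (by rw [hb]; exact List.mem_cons_self)
        omega
    rw [hsh, PySem.List.max?_id_cons]
    -- value of B: rest.foldl max g0; compute it as the fold over the whole gap list from 0
    have hv : (gapsList (-1) (pyBarrIdx mx 0 nums) (nums.length : Int)).foldl max 0
        = rest.foldl max g0 := by
      rw [hsh, List.foldl_cons]
      congr 1
      omega
    have hg : (gapsList (-1) (pyBarrIdx mx 0 nums) (nums.length : Int)).foldl max 0
        = gRun mx 0 nums := by
      rw [gapsList_foldl]
      have h0 : ((0 : Nat) : Int) + (nums.length : Int) = (nums.length : Int) := by push_cast; ring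
      rw [← h0, gapFold_barr mx nums 0 (-1) 0]
      have h1 : ((0 : Nat) : Int) - (-1) - 1 = 0 := by norm_num
      rw [h1]
      have := gRun_ge mx (0 : Int) nums
      omega
    have hfin : rest.foldl max g0 = gRun mx 0 nums := by rw [← hv]; exact hg
    rw [foldlA_eq_gRun mx nums 0 0 le_rfl le_rfl]
    rw [show max 0 (gRun mx 0 nums) = gRun mx 0 nums from by
      have := gRun_ge mx (0 : Int) nums; omega]
    rw [← hfin]
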